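-- pv_equiv track=rewrite | github.com/Patrone411/waymo_scenario_extraction | scenario_extraction/scenario_matching/matching/parallel_block.py | _join_role_maps
-- ===== SOURCE A (Python) =====
-- from typing import Any, Dict, List, Optional, Tuple
--
-- def _join_role_maps(maps: List[Dict[str, str]]) -> Optional[Dict[str, str]]:
--     """
--     Merge role->actor maps; return None if any role maps to conflicting actors.
--     """
--     merged: Dict[str, str] = {}
--     for m in maps:
--         for role, actor in m.items():
--             if role in merged and merged[role] != actor:
--                 return None
--             merged[role] = actor
--     return merged
-- ===== SOURCE B (Python) =====
-- from typing import Dict, List, Optional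
--
--
-- def _join_role_maps(maps: List[Dict[str, str]]) -> Optional[Dict[str, str]]:
--     """
--     Merge role->actor maps; return None if any role maps to conflicting actors.
--
--     Alternative decomposition: first build a role -> set-of-actors index over
--     all maps, then validate it in a separate pass.
--     """
--     grouping: Dict[str, set] = {}
--     for m in maps:
--         for role, actor in m.items():
--             grouping.setdefault(role, set()).add(actor)
--     if any(len(actors) != 1 for actors in grouping.values()):
--         return None
--     return {role: actors.pop() for role, actors in grouping.items()}
-- ===== Notes on version B (the rewrite author's own statement) =====
-- stated objective: alternative
-- what changed: B builds a role -> set-of-actors grouping index over all maps in one pass and then validates it in a separate pass (any set with more than one actor means conflict), instead of A's inline conflict check with an early return while merging.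
import Mathlib
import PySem

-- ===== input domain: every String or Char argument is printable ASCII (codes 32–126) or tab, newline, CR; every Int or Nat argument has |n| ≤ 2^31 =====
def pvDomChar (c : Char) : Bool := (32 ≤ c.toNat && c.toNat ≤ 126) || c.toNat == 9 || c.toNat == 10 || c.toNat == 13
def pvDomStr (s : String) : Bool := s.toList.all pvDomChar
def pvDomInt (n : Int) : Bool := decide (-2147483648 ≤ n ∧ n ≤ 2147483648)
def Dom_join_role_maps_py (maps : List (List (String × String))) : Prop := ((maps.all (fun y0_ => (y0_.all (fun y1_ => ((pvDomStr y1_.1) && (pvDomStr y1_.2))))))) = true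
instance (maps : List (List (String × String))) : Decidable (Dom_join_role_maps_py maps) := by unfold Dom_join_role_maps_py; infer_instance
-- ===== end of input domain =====

-- B groups role -> set of actors in one pass and validates the index in a second pass,
-- instead of A's inline conflict check with early return; same cost, different decomposition.
-- Each inner List (String × String) encodes a Python dict: both ports read it through
-- PySem.Dict.ofList (= dict(pairs)), exactly as the Python functions receive a dict.

-- ===== PORT A =====
def joinAInner : PySem.Dict String String → List (String × String) → Option (PySem.Dict String String)
  | merged, [] => some merged
  | merged, (role, actor) :: rest =>
    -- `if role in merged and merged[role] != actor: return None`
    match merged.get? role with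
    | some prev =>
      if prev ≠ actor then none
      else joinAInner (merged.insert role actor) rest
    | none => joinAInner (merged.insert role actor) rest

def joinAOuter : PySem.Dict String String → List (List (String × String)) → Option (PySem.Dict String String)
  | merged, [] => some merged
  | merged, m :: ms =>
    match joinAInner merged (PySem.Dict.ofList m).items with
    | some merged' => joinAOuter merged' ms
    | none => none

def join_role_maps_py (maps : List (List (String × String))) : Option (List (String × String)) :=
  (joinAOuter PySem.Dict.empty maps).map (fun d => d.items)

-- ===== PORT B =====
def join_role_maps_py_alt (maps : List (List (String × String))) : Option (List (String × String)) :=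
  -- grouping.setdefault(role, set()).add(actor)  =  modify with default empty set
  let grouping : PySem.Dict String (PySem.Set String) :=
    maps.foldl
      (fun g m =>
        (PySem.Dict.ofList m).items.foldl
          (fun g p => g.modify p.1 [] (fun s => PySem.Set.add s p.2)) g)
      PySem.Dict.empty
  if grouping.values.any (fun s => decide (s.length ≠ 1)) then none
  else some (grouping.items.map (fun p => (p.1, p.2.headD "")))  -- actors.pop() of a singleton set

-- ===== PRECONDITION & SPEC =====
def Spec_join_role_maps_py (maps : List (List (String × String))) (out : Option (List (String × String))) : Prop := out = join_role_maps_py_alt maps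
instance (maps : List (List (String × String))) (out : Option (List (String × String))) : Decidable (Spec_join_role_maps_py maps out) := by unfold Spec_join_role_maps_py; infer_instance

-- ===== CLAIM (what is proved, stated in full; the proofs are below) =====
def Claim_equal_join_role_maps_py : Prop := ∀ (maps : List (List (String × String))), Dom_join_role_maps_py maps → Spec_join_role_maps_py maps (join_role_maps_py maps)

-- ===== LEMMAS AND PROOFS =====

-- B's grouping step over one (role, actor) pair, and its fold over a pair list
def stepG (g : PySem.Dict String (PySem.Set String)) (p : String × String) : PySem.Dict String (PySem.Set String) :=
  g.modify p.1 [] (fun s => PySem.Set.add s p.2)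

-- invariant: g's sets are all singletons whose elements spell out exactly A's merged dict
def InvAB (d : PySem.Dict String String) (g : PySem.Dict String (PySem.Set String)) : Prop :=
  g.keys.Nodup ∧ d.items = g.items.map (fun p => (p.1, p.2.headD "")) ∧ ∀ p ∈ g.items, p.2.length = 1

-- a conflict recorded in the grouping: some role's set has ≥ 2 actors
def Bad (g : PySem.Dict String (PySem.Set String)) : Prop :=
  ∃ k, 2 ≤ (g.getD k []).length

theorem keys_eq_of_inv (d : PySem.Dict String String) (g : PySem.Dict String (PySem.Set String))
    (h : InvAB d g) : d.keys = g.keys := by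
  obtain ⟨_, hitems, _⟩ := h
  simp only [PySem.Dict.keys, hitems, List.map_map]
  rfl

theorem insert_self_eq {ν : Type} (d : PySem.Dict String ν) (k : String) (v : ν)
    (hnd : d.keys.Nodup) (h : d.get? k = some v) : d.insert k v = d := by
  have hc : d.contains k = true := by
    rw [PySem.Dict.contains_eq_isSome_get?, h]; rfl
  apply PySem.Dict.ext
  rw [PySem.Dict.items_insert_of_contains d v hc]
  rw [List.map_congr_left (g := id), List.map_id]
  intro p hp
  by_cases hk : p.1 = k
  · have : d.get? p.1 = some p.2 := PySem.Dict.get?_of_mem_items d (by exact hp) hnd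
    rw [hk, h] at this
    have hv : v = p.2 := by injection this
    obtain ⟨p1, p2⟩ := p
    simp_all
  · simp [hk]

theorem len_le_add (s : PySem.Set String) (x : String) : s.length ≤ (PySem.Set.add s x).length := by
  rw [PySem.Set.add_eq_ite]
  split
  · exact le_refl _
  · simp

theorem bad_stepG (g : PySem.Dict String (PySem.Set String)) (p : String × String)
    (h : Bad g) : Bad (stepG g p) := by
  obtain ⟨k, hk⟩ := h
  refine ⟨k, ?_⟩
  unfold stepG
  rw [PySem.Dict.getD_modify]
  split
  · rename_i he
    subst he
    exact le_trans hk (len_le_add _ _)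
  · exact hk

theorem bad_foldG (l : List (String × String)) (g : PySem.Dict String (PySem.Set String))
    (h : Bad g) : Bad (l.foldl stepG g) := by
  induction l generalizing g with
  | nil => exact h
  | cons p rest ih => exact ih _ (bad_stepG g p h)

theorem bad_foldMaps (ms : List (List (String × String)))
    (g : PySem.Dict String (PySem.Set String)) (h : Bad g) :
    Bad (ms.foldl (fun g m => (PySem.Dict.ofList m).items.foldl stepG g) g) := by
  induction ms generalizing g with
  | nil => exact h
  | cons m rest ih => exact ih _ (bad_foldG _ _ h)

-- one grouping step from an InvAB state, mirrored against A's three branches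
theorem inv_fresh (d : PySem.Dict String String) (g : PySem.Dict String (PySem.Set String))
    (r a : String) (hinv : InvAB d g) (hr : g.get? r = none) :
    InvAB (d.insert r a) (stepG g (r, a)) := by
  obtain ⟨hnd, hitems, hlen⟩ := hinv
  have hrk : r ∉ g.keys := (PySem.Dict.get?_eq_none_iff_not_mem_keys g r).mp hr
  have hgc : g.contains r = false := by
    rw [PySem.Dict.contains_eq_decide_mem_keys]
    simp [hrk]
  have hdc : d.contains r = false := by
    rw [PySem.Dict.contains_eq_decide_mem_keys]
    rw [keys_eq_of_inv d g ⟨hnd, hitems, hlen⟩]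
    simp [hrk]
  have hgd : g.getD r [] = [] := PySem.Dict.getD_of_not_contains g [] hgc
  have hstep : (stepG g (r, a)).items = g.items ++ [(r, [a])] := by
    unfold stepG PySem.Dict.modify
    rw [PySem.Dict.items_insert_of_not_contains _ _ hgc]
    simp [hgd, PySem.Set.add]
  refine ⟨?_, ?_, ?_⟩
  · have : (stepG g (r, a)).keys = g.keys ++ [r] := by
      simp only [PySem.Dict.keys, hstep]; simp
    rw [this]
    have hdisj : List.Disjoint g.keys [r] := by
      intro a ha hr'
      simp only [List.mem_singleton] at hr'
      exact hrk (hr' ▸ ha)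
    exact List.Nodup.append hnd (List.nodup_singleton r) hdisj
  · rw [PySem.Dict.items_insert_of_not_contains d a hdc, hstep]
    simp [hitems]
  · rw [hstep]
    intro p hp
    rcases List.mem_append.mp hp with h1 | h2
    · exact hlen p h1
    · simp at h2; subst h2; rfl

theorem inv_same (d : PySem.Dict String String) (g : PySem.Dict String (PySem.Set String))
    (r x : String) (hinv : InvAB d g) (hg : g.get? r = some [x]) :
    d.insert r x = d ∧ stepG g (r, x) = g := by
  obtain ⟨hnd, hitems, hlen⟩ := hinv
  have hmem : (r, [x]) ∈ g.items := PySem.Dict.mem_items_of_get?_eq_some g hg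
  have hdnd : d.keys.Nodup := by rw [keys_eq_of_inv d g ⟨hnd, hitems, hlen⟩]; exact hnd
  have hdmem : (r, x) ∈ d.items := by
    rw [hitems]
    exact List.mem_map.mpr ⟨(r, [x]), hmem, rfl⟩
  have hdget : d.get? r = some x := PySem.Dict.get?_of_mem_items d hdmem hdnd
  refine ⟨insert_self_eq d r x hdnd hdget, ?_⟩
  have hgd : g.getD r [] = [x] := PySem.Dict.getD_of_get?_eq_some g [] hg
  unfold stepG PySem.Dict.modify
  simp only [hgd]
  rw [PySem.Set.add_of_mem (by simp)]
  exact insert_self_eq _ r [x] hnd hg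

theorem get?_singleton (g : PySem.Dict String (PySem.Set String)) (d : PySem.Dict String String)
    (hinv : InvAB d g) (r : String) (s : PySem.Set String) (hg : g.get? r = some s) :
    ∃ x, s = [x] := by
  obtain ⟨hnd, _, hlen⟩ := hinv
  have hmem : (r, s) ∈ g.items := PySem.Dict.mem_items_of_get?_eq_some g hg
  have := hlen _ hmem
  match s, this with
  | [x], _ => exact ⟨x, rfl⟩

-- inner loop: from an InvAB state, A's merge over a pair list and B's grouping stay in sync
theorem inner_sync (l : List (String × String)) (d : PySem.Dict String String)
    (g : PySem.Dict String (PySem.Set String)) (hinv : InvAB d g) :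
    (∃ d', joinAInner d l = some d' ∧ InvAB d' (l.foldl stepG g)) ∨
    (joinAInner d l = none ∧ Bad (l.foldl stepG g)) := by
  induction l generalizing d g with
  | nil => exact Or.inl ⟨d, rfl, hinv⟩
  | cons p rest ih =>
    obtain ⟨r, a⟩ := p
    have hkeys := keys_eq_of_inv d g hinv
    cases hg : g.get? r with
    | none =>
      have hdg : d.get? r = none := by
        rw [PySem.Dict.get?_eq_none_iff_not_mem_keys] at hg ⊢
        rw [hkeys]; exact hg
      have hinv' := inv_fresh d g r a hinv hg
      simp only [joinAInner, hdg, List.foldl_cons]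
      exact ih (d.insert r a) (stepG g (r, a)) hinv'
    | some s =>
      obtain ⟨x, rfl⟩ := get?_singleton g d hinv r s hg
      have hdget : d.get? r = some x := by
        obtain ⟨hnd, hitems, hlen⟩ := hinv
        have hdnd : d.keys.Nodup := by rw [hkeys]; exact hnd
        exact PySem.Dict.get?_of_mem_items d
          (by rw [hitems]; exact List.mem_map.mpr ⟨(r, [x]), PySem.Dict.mem_items_of_get?_eq_some g hg, rfl⟩) hdnd
      by_cases hax : x = a
      · subst hax
        obtain ⟨hd, hgstep⟩ := inv_same d g r x hinv hg
        simp only [joinAInner, hdget, List.foldl_cons, hgstep, hd]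
        rw [if_neg (by simp)]
        exact ih d g hinv
      · have hbad : Bad (stepG g (r, a)) := by
          refine ⟨r, ?_⟩
          unfold stepG
          rw [PySem.Dict.getD_modify]
          rw [if_pos rfl, PySem.Dict.getD_of_get?_eq_some g [] hg]
          rw [PySem.Set.add_of_not_mem (by simp; intro h; subst h; exact hax rfl)]
          simp
        refine Or.inr ⟨?_, ?_⟩
        · simp only [joinAInner, hdget]
          rw [if_pos (by simp; intro h; subst h; exact hax rfl)]
        · simp only [List.foldl_cons]
          exact bad_foldG rest _ hbad
theorem outer_sync (ms : List (List (String × String))) (d : PySem.Dict String String)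
    (g : PySem.Dict String (PySem.Set String)) (hinv : InvAB d g) :
    (∃ d', joinAOuter d ms = some d' ∧
        InvAB d' (ms.foldl (fun g m => (PySem.Dict.ofList m).items.foldl stepG g) g)) ∨
    (joinAOuter d ms = none ∧
        Bad (ms.foldl (fun g m => (PySem.Dict.ofList m).items.foldl stepG g) g)) := by
  induction ms generalizing d g with
  | nil => exact Or.inl ⟨d, rfl, hinv⟩
  | cons m rest ih =>
    rcases inner_sync (PySem.Dict.ofList m).items d g hinv with ⟨d', hsome, hinv'⟩ | ⟨hnone, hbad⟩
    · simp only [joinAOuter, hsome, List.foldl_cons]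
      exact ih d' _ hinv'
    · refine Or.inr ⟨?_, ?_⟩
      · simp only [joinAOuter, hnone]
      · simp only [List.foldl_cons]
        exact bad_foldMaps rest _ hbad

theorem finalize_of_inv (d : PySem.Dict String String) (g : PySem.Dict String (PySem.Set String))
    (hinv : InvAB d g) :
    (if g.values.any (fun s => decide (s.length ≠ 1)) then none
     else some (g.items.map (fun p => (p.1, p.2.headD "")))) = some d.items := by
  obtain ⟨_, hitems, hlen⟩ := hinv
  rw [if_neg, hitems]
  simp only [Bool.not_eq_true, List.any_eq_false]
  intro s hs
  simp only [PySem.Dict.values] at hs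
  obtain ⟨p, hp, rfl⟩ := List.mem_map.mp hs
  simp [hlen p hp]

theorem finalize_of_bad (g : PySem.Dict String (PySem.Set String)) (hbad : Bad g) :
    (if g.values.any (fun s => decide (s.length ≠ 1)) then none
     else some (g.items.map (fun p => (p.1, p.2.headD "")))) = none := by
  obtain ⟨k, hk⟩ := hbad
  rw [if_pos]
  cases hget : g.get? k with
  | none =>
    rw [PySem.Dict.getD_of_get?_eq_none g [] hget] at hk
    simp at hk
  | some s =>
    have hs : s ∈ g.values := by
      simp only [PySem.Dict.values]
      exact List.mem_map.mpr ⟨(k, s), PySem.Dict.mem_items_of_get?_eq_some g hget, rfl⟩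
    rw [PySem.Dict.getD_of_get?_eq_some g [] hget] at hk
    exact List.any_eq_true.mpr ⟨s, hs, by simp; omega⟩

theorem inv_empty : InvAB (PySem.Dict.empty (κ := String) (ν := String)) (PySem.Dict.empty) :=
  ⟨List.nodup_nil, rfl, by intro p hp; simp [PySem.Dict.empty] at hp⟩

-- ===== VERDICT (by name: the statement is the Claim_ definition above) =====
theorem join_role_maps_py_spec : Claim_equal_join_role_maps_py := by
  intro maps _
  unfold Spec_join_role_maps_py join_role_maps_py join_role_maps_py_alt
  rcases outer_sync maps PySem.Dict.empty PySem.Dict.empty inv_empty with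
    ⟨d', hsome, hinv'⟩ | ⟨hnone, hbad⟩
  · rw [hsome, Option.map_some]
    exact (finalize_of_inv d' _ hinv').symm
  · rw [hnone, Option.map_none]
    exact (finalize_of_bad _ hbad).symm
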